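-- pv_equiv track=rewrite | github.com/seojh8910/algorithm | 프로그래머스/unrated/181887. 홀수 vs 짝수/홀수 vs 짝수.py | solution
-- ===== SOURCE A (Python) =====
-- def solution(num_list):
--     even_num_sum = 0
--     odd_num_sum = 0
--     for i, num in enumerate(num_list):
--         if i%2 == 1:
--             odd_num_sum += num
--         else:
--             even_num_sum += num
--     if odd_num_sum > even_num_sum:
--         answer = odd_num_sum
--     else:
--         answer = even_num_sum
--     return answer
-- ===== SOURCE B (Python) =====
-- def solution(num_list):
--     return max(sum(num_list[::2]), sum(num_list[1::2]))
-- ===== Notes on version B (the rewrite author's own statement) =====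
-- stated objective: idiomatic
-- what changed: Replaces A's single enumerate loop with parity branching by two strided slices summed independently and combined with max (ties resolve to the even-index sum, as in A); the Python-level per-element loop disappears into C-level slice and sum.
import Mathlib
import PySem

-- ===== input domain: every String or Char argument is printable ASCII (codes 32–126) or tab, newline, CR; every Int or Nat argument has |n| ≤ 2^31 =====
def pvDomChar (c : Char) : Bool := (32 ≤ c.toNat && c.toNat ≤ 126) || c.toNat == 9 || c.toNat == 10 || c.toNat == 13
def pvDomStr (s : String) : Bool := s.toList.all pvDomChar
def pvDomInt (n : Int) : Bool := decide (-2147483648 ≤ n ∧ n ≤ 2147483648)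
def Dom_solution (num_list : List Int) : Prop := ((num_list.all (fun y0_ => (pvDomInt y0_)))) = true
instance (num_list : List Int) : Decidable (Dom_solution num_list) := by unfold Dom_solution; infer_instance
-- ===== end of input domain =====

-- B sums the two strided slices and takes max instead of A's branching enumerate loop (idiomatic two-pass decomposition, same O(n) cost).

-- ===== PORT A =====
def solution (num_list : List Int) : Int :=
  let p := (PySem.List.enumerate num_list 0).foldl
    (fun (st : Int × Int) (iv : Int × Int) =>
      if PySem.Int.mod iv.1 2 = 1 then (st.1, st.2 + iv.2) else (st.1 + iv.2, st.2))
    (0, 0)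
  if p.2 > p.1 then p.2 else p.1

-- ===== PORT B =====
def solution_alt (num_list : List Int) : Int :=
  max (((PySem.List.slice? num_list none none 2).getD []).sum)
      (((PySem.List.slice? num_list (some 1) none 2).getD []).sum)

-- ===== PRECONDITION & SPEC =====
def Spec_solution (num_list : List Int) (out : Int) : Prop := out = solution_alt num_list
instance (num_list : List Int) (out : Int) : Decidable (Spec_solution num_list out) := by unfold Spec_solution; infer_instance

-- ===== CLAIM (what is proved, stated in full; the proofs are below) =====
def Claim_equal_solution : Prop := ∀ (num_list : List Int), Dom_solution num_list → Spec_solution num_list (solution num_list)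

-- ===== LEMMAS AND PROOFS =====

-- elements of a list at even positions (proof-side characterisation of both programs)
def evens : List Int → List Int
  | [] => []
  | [x] => [x]
  | x :: _ :: t => x :: evens t

theorem slice?_even : ∀ (xs : List Int), PySem.List.slice? xs none none 2 = some (evens xs)
  | [] => by decide
  | [x] => by
      simp [PySem.List.slice?, PySem.List.sliceIndices, evens]
  | x :: y :: t => by
      have ih := slice?_even t
      simp [PySem.List.slice?, PySem.List.sliceIndices, evens] at ih ⊢
      have hc : (if (0:Int) ≤ (t.length:Int) + 1 then (((t.length:Int) + 1 + 1 + 2 - 1) / 2).toNat else 0)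
          = (if 0 < t.length then (((t.length:Int) + 2 - 1) / 2).toNat else 0) + 1 := by
        split_ifs <;> omega
      rw [hc, List.range_succ_eq_map, List.filterMap_cons]
      have h0 : ((2 : Int) * ((0:Nat):Int)).toNat = 0 := by omega
      rw [h0]
      simp only [List.getElem?_cons_zero, List.filterMap_map]
      have hfun : ∀ k : Nat, (x :: y :: t)[(2 * ((k:Nat).succ :Int)).toNat]? = t[(2*(k:Int)).toNat]? := by
        intro k
        have h2 : ((2:Int) * ((k:Nat).succ : Int)).toNat = (2*(k:Int)).toNat + 2 := by
          push_cast; omega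
        rw [h2]; simp
      rw [show ((fun k : Nat => (x :: y :: t)[(2 * (k:Int)).toNat]?) ∘ Nat.succ) = fun k : Nat => t[(2*(k:Int)).toNat]? from funext fun k => hfun k]
      rw [ih]

theorem slice?_odd : ∀ (xs : List Int), PySem.List.slice? xs (some 1) none 2 = some (evens xs.tail)
  | [] => by decide
  | x :: t => by
      have ih := slice?_even t
      simp [PySem.List.slice?, PySem.List.sliceIndices] at ih ⊢
      have hfun : (fun k : Nat => (x :: t)[(1 + 2 * (k:Int)).toNat]?) = fun k : Nat => t[(2*(k:Int)).toNat]? :=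
        funext fun k => by
          have h1 : ((1:Int) + 2*(k:Int)).toNat = (2*(k:Int)).toNat + 1 := by omega
          rw [h1]; simp
      rw [hfun, ih]

theorem evens_cons_sum (x : Int) (t : List Int) :
    (evens (x :: t)).sum = x + (evens t.tail).sum := by
  cases t <;> simp [evens]

theorem loop_eq : ∀ (t : List Int) (s e o : Int), 0 ≤ s →
    (PySem.List.enumerate t s).foldl
      (fun (st : Int × Int) (iv : Int × Int) =>
        if PySem.Int.mod iv.1 2 = 1 then (st.1, st.2 + iv.2) else (st.1 + iv.2, st.2))
      (e, o)
    = if s % 2 = 0 then (e + (evens t).sum, o + (evens t.tail).sum)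
      else (e + (evens t.tail).sum, o + (evens t).sum)
  | [] => by
      intro s e o hs
      rcases em (s % 2 = 0) with h | h <;> simp [PySem.List.enumerate, evens, h]
  | x :: t => by
      intro s e o hs
      have ih := loop_eq t (s+1)
      rw [PySem.List.enumerate_cons, List.foldl_cons]
      have hmod : PySem.Int.mod s 2 = s % 2 := by
        simp [PySem.Int.mod, Int.fmod_eq_emod]
      by_cases h : s % 2 = 0
      · rw [if_neg (by rw [hmod]; omega)]
        rw [ih (e + x) o (by omega), if_neg (by omega), if_pos h]
        rw [evens_cons_sum]
        simp only [List.tail_cons, Prod.mk.injEq]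
        exact ⟨by ring, trivial⟩
      · rw [if_pos (by rw [hmod]; omega)]
        rw [ih e (o + x) (by omega), if_pos (by omega), if_neg h]
        rw [evens_cons_sum]
        simp only [List.tail_cons, Prod.mk.injEq]
        exact ⟨trivial, by ring⟩

-- ===== VERDICT (by name: the statement is the Claim_ definition above) =====
theorem solution_spec : Claim_equal_solution := by
  intro l _
  unfold Spec_solution solution solution_alt
  rw [slice?_even, slice?_odd, loop_eq l 0 0 0 le_rfl]
  simp [max_def]
  split_ifs <;> omega
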